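-- pv_equiv track=rewrite | github.com/DrDonut326/AdventofCode | 2017/Day 21 Try 2.py | array_2d_to_rule_string
-- ===== SOURCE A (Python) =====
-- def array_2d_to_rule_string(arr):
--     ans = []
--     for row in arr:
--         for element in row:
--             ans.append(element)
--         ans.append('/')
--     # Get rid of final /
--     ans = ans[:-1]
--     ans = ''.join(ans)
--     return ans
-- ===== SOURCE B (Python) =====
-- def array_2d_to_rule_string(arr):
--     def row_str(row):
--         return row[0] + row_str(row[1:]) if row else ''
--     if not arr:
--         return ''
--     if len(arr) == 1:
--         return row_str(arr[0])
--     return row_str(arr[0]) + '/' + array_2d_to_rule_string(arr[1:])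
-- ===== Notes on version B (the rewrite author's own statement) =====
-- stated objective: alternative
-- what changed: Replaces A's single flat accumulator list (elements interleaved with '/' sentinels, trailing slash trimmed with ans[:-1], then one ''.join) by direct structural recursion: a recursive helper concatenates one row's elements, and the function recurses on the tail of the row list, inserting '/' only between a row and a non-empty remainder, so no sentinel, no trim and no join are used.
import Mathlib
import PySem

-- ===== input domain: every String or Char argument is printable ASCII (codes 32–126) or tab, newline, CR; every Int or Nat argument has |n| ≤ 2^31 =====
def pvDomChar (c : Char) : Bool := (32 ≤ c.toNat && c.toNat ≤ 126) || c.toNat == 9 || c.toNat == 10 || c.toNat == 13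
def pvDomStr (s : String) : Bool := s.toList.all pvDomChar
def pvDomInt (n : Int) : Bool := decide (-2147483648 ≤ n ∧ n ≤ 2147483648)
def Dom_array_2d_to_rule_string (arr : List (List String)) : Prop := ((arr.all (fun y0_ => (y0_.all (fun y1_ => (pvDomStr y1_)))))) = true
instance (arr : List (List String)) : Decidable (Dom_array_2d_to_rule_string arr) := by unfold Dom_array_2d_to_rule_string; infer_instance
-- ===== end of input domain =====

-- B replaces A's flat accumulator with '/' sentinels (and the ans[:-1] trim) by direct
-- structural recursion on rows/rest, inserting '/' only between rows — an alternative
-- decomposition of the same O(total) task (return value only; no mutation involved).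


-- ===== PORT A =====
-- flat accumulator: append every element, a '/' after each row, trim ans[:-1], join
def array_2d_to_rule_string (arr : List (List String)) : String :=
  let ans : List String :=
    arr.foldl (fun ans row => (row.foldl (fun a e => a ++ [e]) ans) ++ ["/"]) []
  let ans := PySem.List.slice ans none (some (-1))
  PySem.Str.join "" ans

-- ===== PORT B =====
-- row_str: row[0] + row_str(row[1:]) if row else '' (head/tail recursion, exact)
def pvRowStr : List String → String
  | [] => ""
  | e :: rest => e ++ pvRowStr rest

-- recursion on the row list; '/' inserted only between a row and a non-empty remainder
def array_2d_to_rule_string_alt : List (List String) → String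
  | [] => ""
  | [r] => pvRowStr r
  | r :: rest => pvRowStr r ++ "/" ++ array_2d_to_rule_string_alt rest

-- ===== PRECONDITION & SPEC =====
def Spec_array_2d_to_rule_string (arr : List (List String)) (out : String) : Prop := out = array_2d_to_rule_string_alt arr
instance (arr : List (List String)) (out : String) : Decidable (Spec_array_2d_to_rule_string arr out) := by unfold Spec_array_2d_to_rule_string; infer_instance

-- ===== CLAIM (what is proved, stated in full; the proofs are below) =====
def Claim_equal_array_2d_to_rule_string : Prop := ∀ (arr : List (List String)), Dom_array_2d_to_rule_string arr → Spec_array_2d_to_rule_string arr (array_2d_to_rule_string arr)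

-- ===== LEMMAS AND PROOFS =====

-- ''.join concatenates: joining with the empty separator is flattening
lemma pv_join_nil_eq_flatten (l : List (List Char)) : PySem.Chars.join [] l = l.flatten := by
  induction l with
  | nil => rfl
  | cons p rest ih =>
    cases rest with
    | nil => simp [PySem.Chars.join_singleton]
    | cons q r2 => rw [PySem.Chars.join_cons_cons]; simp [ih]

-- A's accumulator equals the flatMap of rows, each followed by a '/' sentinel
lemma pv_acc_eq_flatMap : ∀ (arr : List (List String)) (acc : List String),
    arr.foldl (fun ans row => (row.foldl (fun a e => a ++ [e]) ans) ++ ["/"]) acc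
      = acc ++ arr.flatMap (fun row => row ++ ["/"]) := by
  intro arr
  induction arr with
  | nil => simp
  | cons r rest ih =>
    intro acc
    rw [List.foldl_cons, ih, PySem.List.foldl_append_eq_flatMap]
    simp

lemma pv_key_chars : ∀ (arr : List (List (List Char))),
    PySem.Chars.join [] ((arr.flatMap (fun row => row ++ [['/']])).dropLast)
      = PySem.Chars.join ['/'] (arr.map (fun row => PySem.Chars.join [] row)) := by
  intro arr
  induction arr with
  | nil => rfl
  | cons r rest ih =>
    cases rest with
    | nil => simp [PySem.Chars.join_singleton, pv_join_nil_eq_flatten]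
    | cons r2 rest2 =>
      have hne : ((r2 :: rest2).flatMap (fun row => row ++ [['/']])) ≠ [] := by
        simp [List.flatMap_cons]
      rw [List.flatMap_cons (x := r), List.dropLast_append_of_ne_nil hne]
      simp only [List.map_cons, PySem.Chars.join_cons_cons, pv_join_nil_eq_flatten] at ih ⊢
      rw [List.flatMap_cons (x := r2), List.append_assoc,
        List.dropLast_append_of_ne_nil (by simp), List.singleton_append,
        List.flatten_append] at ih
      simp [List.flatten_append, ih, List.append_assoc]

-- core (string side): dropping the final sentinel and flat-joining = two-level join
lemma pv_key (arr : List (List String)) :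
    PySem.Str.join "" ((arr.flatMap (fun row => row ++ ["/"])).dropLast)
      = PySem.Str.join "/" (arr.map (fun row => PySem.Str.join "" row)) := by
  apply String.toList_injective
  have h := pv_key_chars (arr.map (List.map String.toList))
  simp only [PySem.Str.toList_join, List.map_map, List.flatMap_map, Function.comp_def,
    List.map_dropLast, List.map_flatMap, List.map_append, List.map_cons, List.map_nil] at h ⊢
  exact h

-- B's row recursion computes ''.join(row)
lemma pv_rowStr_eq (r : List String) : pvRowStr r = PySem.Str.join "" r := by
  apply String.toList_injective
  have h0 : ("" : String).toList = ([] : List Char) := rfl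
  induction r with
  | nil => simp [pvRowStr, h0]
  | cons e rest ih =>
    simp only [pvRowStr, String.toList_append, ih, PySem.Str.toList_join, h0,
      pv_join_nil_eq_flatten, List.map_cons, List.flatten_cons]

-- B's recursion computes the two-level join
lemma pv_alt_eq_join : ∀ (arr : List (List String)),
    array_2d_to_rule_string_alt arr = PySem.Str.join "/" (arr.map (fun row => PySem.Str.join "" row)) := by
  intro arr
  induction arr with
  | nil => rfl
  | cons r rest ih =>
    cases rest with
    | nil =>
      rw [show array_2d_to_rule_string_alt [r] = pvRowStr r from rfl, pv_rowStr_eq]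
      apply String.toList_injective
      simp [PySem.Str.toList_join, PySem.Chars.join_singleton]
    | cons r2 rest2 =>
      apply String.toList_injective
      show (pvRowStr r ++ "/" ++ array_2d_to_rule_string_alt (r2 :: rest2)).toList = _
      rw [pv_rowStr_eq, ih]
      simp only [String.toList_append, PySem.Str.toList_join, List.map_cons,
        PySem.Chars.join_cons_cons]

-- ===== VERDICT (by name: the statement is the Claim_ definition above) =====
theorem array_2d_to_rule_string_spec : Claim_equal_array_2d_to_rule_string := by
  intro arr _
  unfold Spec_array_2d_to_rule_string array_2d_to_rule_string
  show PySem.Str.join "" (PySem.List.slice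
      (arr.foldl (fun ans row => (row.foldl (fun a e => a ++ [e]) ans) ++ ["/"]) [])
      none (some (-1))) = _
  rw [show (PySem.List.slice
      (arr.foldl (fun ans row => (row.foldl (fun a e => a ++ [e]) ans) ++ ["/"]) [])
      none (some (-1)))
      = (arr.flatMap (fun row => row ++ ["/"])).dropLast by
    rw [pv_acc_eq_flatMap arr []]; simp [PySem.List.slice_to_neg_one]]
  rw [pv_key arr]
  exact (pv_alt_eq_join arr).symm
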